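-- pv_equiv track=rewrite | github.com/Tay-Cheeks/Influencer-Intel-Dashboard | backend/src/analysis/YT_benchmarks.py | get_creator_tier
-- ===== SOURCE A (Python) =====
-- from typing import Any, Dict, Tuple
--
-- BENCHMARK_TIERS: Dict[str, Dict[str, Any]] = {
--     # >= 1M subs
--     "mega": {
--         "min_subs": 1_000_000,
--         "benchmarks": {
--             "engagement_rate_percent": (2.0, 6.0),
--             "loyalty_percent": (1.5, 5.0),
--             "views_per_sub_percent": (2.0, 10.0),
--         },
--     },
--     # >= 100k subs
--     "macro": {
--         "min_subs": 100_000,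
--         "benchmarks": {
--             "engagement_rate_percent": (2.5, 7.0),
--             "loyalty_percent": (2.0, 6.0),
--             "views_per_sub_percent": (3.0, 15.0),
--         },
--     },
--     # >= 10k subs
--     "micro": {
--         "min_subs": 10_000,
--         "benchmarks": {
--             "engagement_rate_percent": (3.0, 8.0),
--             "loyalty_percent": (2.5, 7.0),
--             "views_per_sub_percent": (5.0, 25.0),
--         },
--     },
--     # >= 1k subs
--     "nano": {
--         "min_subs": 1_000,
--         "benchmarks": {
--             "engagement_rate_percent": (3.5, 10.0),
--             "loyalty_percent": (3.0, 8.0),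
--             "views_per_sub_percent": (8.0, 35.0),
--         },
--     },
--     # < 1k subs (new)
--     "tiny": {
--         "min_subs": 0,
--         "benchmarks": {
--             "engagement_rate_percent": (4.0, 12.0),
--             "loyalty_percent": (3.5, 10.0),
--             "views_per_sub_percent": (10.0, 50.0),
--         },
--     },
-- }
--
-- def get_creator_tier(subscribers: int | float | None) -> str:
--     """
--     Return a tier label based on subscriber count.
--
--     - Handles None/invalid values gracefully by returning "tiny".
--     - Evaluates tiers top-down by min_subs.
--     """
--     try:
--         subs = int(subscribers or 0)
--     except (TypeError, ValueError):
--         subs = 0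
--
--     # Sort by min_subs desc so the first match is the highest tier.
--     tiers_sorted = sorted(
--         BENCHMARK_TIERS.items(),
--         key=lambda kv: int(kv[1].get("min_subs", 0)),
--         reverse=True,
--     )
--
--     for tier_name, tier_cfg in tiers_sorted:
--         min_subs = int(tier_cfg.get("min_subs", 0))
--         if subs >= min_subs:
--             return tier_name
--
--     return "tiny"
-- ===== SOURCE B (Python) =====
-- def get_creator_tier(subscribers):
--     try:
--         subs = int(subscribers or 0)
--     except (TypeError, ValueError):
--         subs = 0
--     if subs >= 1_000_000:
--         return "mega"
--     elif subs >= 100_000: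
--         return "macro"
--     elif subs >= 10_000:
--         return "micro"
--     elif subs >= 1_000:
--         return "nano"
--     else:
--         return "tiny"
-- ===== Notes on version B (the rewrite author's own statement) =====
-- stated objective: simpler
-- what changed: Replaces the runtime sort of the tier table plus a first-match scan with a direct closed-form threshold ladder of chained comparisons returning the label immediately.
import Mathlib
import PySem

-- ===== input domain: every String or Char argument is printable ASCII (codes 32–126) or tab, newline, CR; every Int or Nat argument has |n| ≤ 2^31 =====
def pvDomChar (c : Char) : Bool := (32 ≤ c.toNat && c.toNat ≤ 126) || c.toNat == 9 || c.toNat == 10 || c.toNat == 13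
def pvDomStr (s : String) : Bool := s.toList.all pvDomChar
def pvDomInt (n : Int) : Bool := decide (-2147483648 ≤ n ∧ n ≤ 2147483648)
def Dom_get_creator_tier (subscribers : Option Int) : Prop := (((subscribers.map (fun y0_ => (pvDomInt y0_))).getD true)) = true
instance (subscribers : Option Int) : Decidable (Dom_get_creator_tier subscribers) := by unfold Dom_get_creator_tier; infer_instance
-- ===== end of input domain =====

-- B replaces A's sort-the-tier-table-and-scan with a direct chained-comparison ladder (simpler decomposition, same values).

-- ===== PORT A =====
-- BENCHMARK_TIERS reduced to the fields the function reads: (name, min_subs) in dict insertion order.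
def pvTiersA : List (String × Int) :=
  [("mega", 1000000), ("macro", 100000), ("micro", 10000), ("nano", 1000), ("tiny", 0)]

-- the for-loop: first tier whose min_subs is ≤ subs, else the fallback "tiny"
def pvLoopA (subs : Int) : List (String × Int) → String
  | [] => "tiny"
  | (name, m) :: rest => if subs ≥ m then name else pvLoopA subs rest

def get_creator_tier (subscribers : Option Int) : String :=
  -- int(subscribers or 0): None → 0 (the try/except never fires on Option Int inputs)
  let subs : Int := subscribers.getD 0
  let tiers_sorted := PySem.List.sorted pvTiersA (fun kv => kv.2) true
  pvLoopA subs tiers_sorted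

-- ===== PORT B =====
def get_creator_tier_alt (subscribers : Option Int) : String :=
  let subs : Int := subscribers.getD 0
  if subs ≥ 1000000 then "mega"
  else if subs ≥ 100000 then "macro"
  else if subs ≥ 10000 then "micro"
  else if subs ≥ 1000 then "nano"
  else "tiny"

-- ===== PRECONDITION & SPEC =====
def Spec_get_creator_tier (subscribers : Option Int) (out : String) : Prop := out = get_creator_tier_alt subscribers
instance (subscribers : Option Int) (out : String) : Decidable (Spec_get_creator_tier subscribers out) := by unfold Spec_get_creator_tier; infer_instance

-- ===== CLAIM (what is proved, stated in full; the proofs are below) =====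
def Claim_equal_get_creator_tier : Prop := ∀ (subscribers : Option Int), Dom_get_creator_tier subscribers → Spec_get_creator_tier subscribers (get_creator_tier subscribers)

-- ===== LEMMAS AND PROOFS =====
theorem pvTiers_sorted_eq :
    PySem.List.sorted pvTiersA (fun kv => kv.2) true = pvTiersA :=
  PySem.List.sorted_rev_eq_self_of_pairwise pvTiersA (fun kv => kv.2) (by decide)

-- ===== VERDICT (by name: the statement is the Claim_ definition above) =====
theorem get_creator_tier_spec : Claim_equal_get_creator_tier := by
  intro subscribers _
  unfold Spec_get_creator_tier get_creator_tier get_creator_tier_alt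
  rw [pvTiers_sorted_eq]
  simp only [pvTiersA, pvLoopA]
  split_ifs <;> rfl
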